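-- pv_equiv track=rewrite | github.com/sholden3/aiorchestration | libs/governance/rules/smart_rules.py | check_file_patterns
-- ===== SOURCE A (Python) =====
-- from typing import Dict, Any, List, Optional, Set, Tuple
--
-- def check_file_patterns(files: List[str]) -> Dict[str, List[str]]:
--     """
--     Analyze file patterns for risks
--     """
--     results = {
--         'test_files': [],
--         'config_files': [],
--         'sensitive_files': [],
--         'documentation': [],
--         'governance_files': []
--     }
--
--     for file in files:
--         file_lower = file.lower()
--
--         # Test files
--         if 'test' in file_lower or 'spec' in file_lower:
--             results['test_files'].append(file)
--
--         # Config files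
--         if any(ext in file_lower for ext in ['.env', '.config', '.yaml', '.yml', '.json']):
--             results['config_files'].append(file)
--
--         # Sensitive files
--         if any(sensitive in file_lower for sensitive in ['password', 'secret', 'key', 'token', 'credential']):
--             results['sensitive_files'].append(file)
--
--         # Documentation
--         if any(ext in file_lower for ext in ['.md', '.rst', '.txt', 'readme']):
--             results['documentation'].append(file)
--
--         # Governance files
--         if 'governance' in file_lower:
--             results['governance_files'].append(file)
--
--     return results
-- ===== SOURCE B (Python) =====
-- _PATTERNS = [
--     ('test', 0), ('spec', 0),
--     ('.env', 1), ('.config', 1), ('.yaml', 1), ('.yml', 1), ('.json', 1),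
--     ('password', 2), ('secret', 2), ('key', 2), ('token', 2), ('credential', 2),
--     ('.md', 3), ('.rst', 3), ('.txt', 3), ('readme', 3),
--     ('governance', 4),
-- ]
--
-- _CATEGORIES = ['test_files', 'config_files', 'sensitive_files',
--                'documentation', 'governance_files']
--
--
-- def _mask(name):
--     """5-bit category mask of one file name (bit i set = belongs to category i)."""
--     lo = name.lower()
--     m = 0
--     for pat, bit in _PATTERNS:
--         if pat in lo:
--             m |= 1 << bit
--     return m
--
--
-- def check_file_patterns(files):
--     """Analyze file patterns for risks: classify each file once into a bitmask,
--     then project the buckets out of the (file, mask) pairs."""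
--     masks = [_mask(f) for f in files]
--     return {cat: [f for f, m in zip(files, masks) if (m >> i) & 1]
--             for i, cat in enumerate(_CATEGORIES)}
-- ===== Notes on version B (the rewrite author's own statement) =====
-- stated objective: alternative
-- what changed: Instead of one interleaved loop appending to five hard-coded lists, B classifies each file once into a 5-bit integer category mask via a flat (pattern, bit) table, then projects each bucket out of the (file, mask) pairs by bit tests.
import Mathlib
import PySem

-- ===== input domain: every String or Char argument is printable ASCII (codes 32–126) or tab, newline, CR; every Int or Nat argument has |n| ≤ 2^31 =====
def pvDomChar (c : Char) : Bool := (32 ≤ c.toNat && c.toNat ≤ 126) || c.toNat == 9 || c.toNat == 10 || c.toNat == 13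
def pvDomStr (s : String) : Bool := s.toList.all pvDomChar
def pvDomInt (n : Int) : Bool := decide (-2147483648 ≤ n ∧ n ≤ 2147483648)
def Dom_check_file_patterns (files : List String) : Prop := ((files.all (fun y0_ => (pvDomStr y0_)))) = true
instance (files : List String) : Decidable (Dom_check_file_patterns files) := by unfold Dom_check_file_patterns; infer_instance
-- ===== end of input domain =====

-- B replaces A's single interleaved loop over five hard-coded lists by a two-stage
-- pass: each file is classified once into a 5-bit category mask via a flat
-- (pattern, bit) table, then the buckets are projected out by bit tests (objective: alternative).

-- ===== PORT A =====
-- A's loop body: the five independent append-if blocks over one shared pass.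
def pvAStep (acc : List String × List String × List String × List String × List String)
    (file : String) : List String × List String × List String × List String × List String :=
  let fl := PySem.Str.lower file
  let (t, c, s, d, g) := acc
  let t := if PySem.Str.isIn "test" fl || PySem.Str.isIn "spec" fl then t ++ [file] else t
  let c := if [".env", ".config", ".yaml", ".yml", ".json"].any (fun ext => PySem.Str.isIn ext fl) then c ++ [file] else c
  let s := if ["password", "secret", "key", "token", "credential"].any (fun w => PySem.Str.isIn w fl) then s ++ [file] else s
  let d := if [".md", ".rst", ".txt", "readme"].any (fun ext => PySem.Str.isIn ext fl) then d ++ [file] else d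
  let g := if PySem.Str.isIn "governance" fl then g ++ [file] else g
  (t, c, s, d, g)

def check_file_patterns (files : List String) : List (String × List String) :=
  let r := files.foldl pvAStep ([], [], [], [], [])
  [("test_files", r.1), ("config_files", r.2.1), ("sensitive_files", r.2.2.1),
   ("documentation", r.2.2.2.1), ("governance_files", r.2.2.2.2)]

-- ===== PORT B =====
def pvPatterns : List (String × Nat) :=
  [("test", 0), ("spec", 0),
   (".env", 1), (".config", 1), (".yaml", 1), (".yml", 1), (".json", 1),
   ("password", 2), ("secret", 2), ("key", 2), ("token", 2), ("credential", 2),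
   (".md", 3), (".rst", 3), (".txt", 3), ("readme", 3),
   ("governance", 4)]

def pvCategories : List String :=
  ["test_files", "config_files", "sensitive_files", "documentation", "governance_files"]

-- _mask: fold over the flat pattern table, or-ing 1 <<< bit in.
def pvMask (name : String) : Nat :=
  let lo := PySem.Str.lower name
  pvPatterns.foldl (fun m pb => if PySem.Str.isIn pb.1 lo then m ||| (1 <<< pb.2) else m) 0

def check_file_patterns_alt (files : List String) : List (String × List String) :=
  let masks := files.map pvMask
  pvCategories.zipIdx.map (fun ci =>
    (ci.1, ((files.zip masks).filter (fun fm => (fm.2 >>> ci.2) % 2 == 1)).map Prod.fst))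

-- ===== PRECONDITION & SPEC =====
def Spec_check_file_patterns (files : List String) (out : List (String × List String)) : Prop := out = check_file_patterns_alt files
instance (files : List String) (out : List (String × List String)) : Decidable (Spec_check_file_patterns files out) := by unfold Spec_check_file_patterns; infer_instance

-- ===== CLAIM (what is proved, stated in full; the proofs are below) =====
def Claim_equal_check_file_patterns : Prop := ∀ (files : List String), Dom_check_file_patterns files → Spec_check_file_patterns files (check_file_patterns files)

-- ===== LEMMAS AND PROOFS =====

-- A's interleaved fold computes, in each component, the per-category filter.
theorem pvA_loop (files t c s d g : List String) :
    files.foldl pvAStep (t, c, s, d, g) =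
      (t ++ files.filter (fun f => PySem.Str.isIn "test" (PySem.Str.lower f) || PySem.Str.isIn "spec" (PySem.Str.lower f)),
       c ++ files.filter (fun f => [".env", ".config", ".yaml", ".yml", ".json"].any (fun p => PySem.Str.isIn p (PySem.Str.lower f))),
       s ++ files.filter (fun f => ["password", "secret", "key", "token", "credential"].any (fun p => PySem.Str.isIn p (PySem.Str.lower f))),
       d ++ files.filter (fun f => [".md", ".rst", ".txt", "readme"].any (fun p => PySem.Str.isIn p (PySem.Str.lower f))),
       g ++ files.filter (fun f => PySem.Str.isIn "governance" (PySem.Str.lower f))) := by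
  induction files generalizing t c s d g with
  | nil => simp
  | cons x xs ih =>
    simp only [List.foldl_cons, pvAStep, List.filter_cons]
    rw [ih]
    split_ifs <;> simp

-- bit i of the pattern-table fold = some pattern with that bit matches (or it was set before)
theorem pvFold_testBit (ps : List (String × Nat)) (lo : String) (m i : Nat) :
    Nat.testBit (ps.foldl (fun m pb => if PySem.Str.isIn pb.1 lo then m ||| (1 <<< pb.2) else m) m) i
      = (m.testBit i || ps.any (fun pb => pb.2 == i && PySem.Str.isIn pb.1 lo)) := by
  induction ps generalizing m with
  | nil => simp
  | cons p ps ih =>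
    simp only [List.foldl_cons, List.any_cons]
    rw [ih]
    by_cases h : PySem.Str.isIn p.1 lo
    · rw [if_pos h, h]
      simp only [Nat.testBit_or, Nat.one_shiftLeft, Nat.testBit_two_pow, Bool.and_true,
        Bool.or_assoc]
      rcases Nat.decEq p.2 i with he | he
      · have hb : (p.2 == i) = false := by simp [he]
        simp [he, hb]
      · simp [he]
    · rw [if_neg h]
      rw [Bool.eq_false_iff.mpr h]
      simp

-- the `(m >> i) & 1` test on pvMask, as a predicate on the file name
theorem pvMask_bit (f : String) (i : Nat) :
    ((pvMask f >>> i) % 2 == 1)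
      = pvPatterns.any (fun pb => pb.2 == i && PySem.Str.isIn pb.1 (PySem.Str.lower f)) := by
  have h : ((pvMask f >>> i) % 2 == 1) = (pvMask f).testBit i := by
    rw [Nat.testBit, Nat.shiftRight_eq_div_pow]
    rcases Nat.mod_two_eq_zero_or_one (pvMask f / 2 ^ i) with h2 | h2 <;>
      simp [Nat.one_and_eq_mod_two, h2]
  rw [h]
  unfold pvMask
  rw [pvFold_testBit]
  simp

-- projecting the (file, mask) pairs through a bit test = filtering files by that bit
theorem pvZipFilter (p : Nat → Bool) (g : String → Nat) (files : List String) :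
    (((files.zip (files.map g)).filter (fun fm => p fm.2)).map Prod.fst)
      = files.filter (fun f => p (g f)) := by
  induction files with
  | nil => simp
  | cons x xs ih =>
    simp only [List.map_cons, List.zip_cons_cons, List.filter_cons]
    by_cases h : p (g x)
    · simp [h, ih]
    · simp [h, ih]

-- ===== VERDICT (by name: the statement is the Claim_ definition above) =====
theorem check_file_patterns_spec : Claim_equal_check_file_patterns := by
  intro files _
  unfold Spec_check_file_patterns check_file_patterns check_file_patterns_alt pvCategories
  rw [pvA_loop]
  simp only [List.zipIdx_cons, List.zipIdx_nil, List.map_cons, List.map_nil]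
  rw [pvZipFilter (fun m => (m >>> 0) % 2 == 1) pvMask, pvZipFilter (fun m => (m >>> 1) % 2 == 1) pvMask,
      pvZipFilter (fun m => (m >>> 2) % 2 == 1) pvMask, pvZipFilter (fun m => (m >>> 3) % 2 == 1) pvMask,
      pvZipFilter (fun m => (m >>> 4) % 2 == 1) pvMask]
  simp only [pvMask_bit, pvPatterns, List.any_cons, List.any_nil]
  simp
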